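-- pv_equiv track=rewrite | github.com/echo-lalia/MicroHydra-Apps | app-source/NumScript/NumScript.py | parse_assignment
-- ===== SOURCE A (Python) =====
-- def is_valid_variable_name(name):
--     if not name:
--         return False
--     def is_alpha(c):
--         return ('a' <= c <= 'z') or ('A' <= c <= 'Z')
--     def is_digit(c):
--         return '0' <= c <= '9'
--     def is_alnum(c):
--         return is_alpha(c) or is_digit(c)
--     if not (is_alpha(name[0]) or name[0] == '_'):
--         return False
--     for char in name:
--         if not (is_alnum(char) or char == '_'):
--             return False
--     return True
--
-- def parse_assignment(expr):
--     comparison_ops = ['==', '!=', '<=', '>=']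
--     for op in comparison_ops:
--         if op in expr:
--             return None, expr
--     if '=' in expr:
--         parts = expr.split('=', 1)
--         if len(parts) == 2:
--             var_name = parts[0].strip()
--             value_expr = parts[1].strip()
--             if is_valid_variable_name(var_name):
--                 return var_name, value_expr
--     return None, expr
-- ===== SOURCE B (Python) =====
-- def parse_assignment(expr):
--     # One pass over the string: flag comparison operators (any '=' whose
--     # predecessor is '=', '!', '<' or '>') and remember the first '=' index.
--     bad = False
--     eq = -1
--     prev = ''
--     for i, ch in enumerate(expr):
--         if ch == '=':
--             if prev in ('=', '!', '<', '>'):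
--                 bad = True
--             if eq < 0:
--                 eq = i
--         prev = ch
--     if bad or eq < 0:
--         return None, expr
--     name = expr[:eq].strip()
--     if name.isidentifier():
--         return name, expr[eq + 1:].strip()
--     return None, expr
-- ===== Notes on version B (the rewrite author's own statement) =====
-- stated objective: simpler
-- what changed: Replaces the four-substring scans plus split plus hand-written per-character identifier validator with a single enumerate pass that both flags comparison operators and records the index of the first equals sign, then slices there and validates the name with str.isidentifier().
import Mathlib
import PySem

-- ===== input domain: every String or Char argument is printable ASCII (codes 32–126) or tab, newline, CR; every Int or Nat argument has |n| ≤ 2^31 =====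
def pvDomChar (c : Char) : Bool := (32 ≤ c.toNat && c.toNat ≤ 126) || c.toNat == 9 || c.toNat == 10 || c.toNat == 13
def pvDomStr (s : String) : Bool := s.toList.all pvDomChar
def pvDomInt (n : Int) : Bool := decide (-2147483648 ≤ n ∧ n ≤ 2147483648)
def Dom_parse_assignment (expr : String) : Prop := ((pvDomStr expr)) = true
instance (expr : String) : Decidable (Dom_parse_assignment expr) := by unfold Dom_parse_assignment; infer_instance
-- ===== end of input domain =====

-- B replaces A's four substring scans + split + per-character validator by one
-- enumerate pass that flags comparison operators and records the first '=' (objective: simpler).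

-- ===== PORT A =====
def pv_is_alpha (c : Char) : Bool := (decide ('a' ≤ c) && decide (c ≤ 'z')) || (decide ('A' ≤ c) && decide (c ≤ 'Z'))
def pv_is_digit (c : Char) : Bool := decide ('0' ≤ c) && decide (c ≤ '9')
def pv_is_alnum (c : Char) : Bool := pv_is_alpha c || pv_is_digit c

def is_valid_variable_name (name : String) : Bool :=
  match name.toList with
  | [] => false                                   -- "if not name: return False"
  | c0 :: _ =>
    if !(pv_is_alpha c0 || c0 == '_') then false
    else (name.toList).all (fun c => pv_is_alnum c || c == '_')   -- the for-loop with early return False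

def parse_assignment (expr : String) : Option String × String :=
  if PySem.Str.isIn "==" expr then (none, expr)
  else if PySem.Str.isIn "!=" expr then (none, expr)
  else if PySem.Str.isIn "<=" expr then (none, expr)
  else if PySem.Str.isIn ">=" expr then (none, expr)
  else if PySem.Str.isIn "=" expr then
    -- parts = expr.split('=', 1); sep "=" is nonempty, so splitMax? is always some
    let parts := (PySem.Str.splitMax? expr "=" 1).getD []
    if parts.length = 2 then
      let var_name := PySem.Str.strip (PySem.List.pyGetD parts 0 "")
      let value_expr := PySem.Str.strip (PySem.List.pyGetD parts 1 "")
      if is_valid_variable_name var_name then (some var_name, value_expr)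
      else (none, expr)
    else (none, expr)
  else (none, expr)

-- ===== PORT B =====
-- the single enumerate loop of Source B: state (eq, bad, prev)
def pvScan : List Char → Int → Option Char → Int → Bool → Int × Bool
  | [], _, _, eq, bad => (eq, bad)
  | c :: rest, i, prev, eq, bad =>
    pvScan rest (i + 1) (some c)
      (if c = '=' ∧ eq < 0 then i else eq)
      (if c = '=' ∧ (prev = some '=' ∨ prev = some '!' ∨ prev = some '<' ∨ prev = some '>')
       then true else bad)

-- port of str.isidentifier (exact on the ASCII domain: keywords pass in Python too)
def pvIsIdentAscii (cs : List Char) : Bool :=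
  match cs with
  | [] => false
  | c :: rest => (PySem.Chars.isalpha c || c == '_') && rest.all (fun d => PySem.Chars.isalnum d || d == '_')

def parse_assignment_alt (expr : String) : Option String × String :=
  let cs := expr.toList
  let r := pvScan cs 0 none (-1) false
  if r.2 || r.1 < 0 then (none, expr)
  else
    let name := PySem.Chars.strip (cs.take r.1.toNat)          -- expr[:eq].strip()
    if pvIsIdentAscii name then
      (some (String.ofList name), String.ofList (PySem.Chars.strip (cs.drop (r.1.toNat + 1))))
    else (none, expr)

-- ===== PRECONDITION & SPEC =====
def Spec_parse_assignment (expr : String) (out : Option String × String) : Prop := out = parse_assignment_alt expr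
instance (expr : String) (out : Option String × String) : Decidable (Spec_parse_assignment expr out) := by unfold Spec_parse_assignment; infer_instance

-- ===== CLAIM (what is proved, stated in full; the proofs are below) =====
def Claim_equal_parse_assignment : Prop := ∀ (expr : String), Dom_parse_assignment expr → Spec_parse_assignment expr (parse_assignment expr)

-- ===== LEMMAS AND PROOFS =====

-- an adjacent comparison-operator pair inside cs
def pvAdj (cs : List Char) : Prop :=
  ∃ a l1 l2, (a = '=' ∨ a = '!' ∨ a = '<' ∨ a = '>') ∧ cs = l1 ++ a :: '=' :: l2

lemma pvAdj_cons (c : Char) (rest : List Char) :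
    pvAdj (c :: rest) ↔
    ((c = '=' ∨ c = '!' ∨ c = '<' ∨ c = '>') ∧ rest.head? = some '=') ∨ pvAdj rest := by
  constructor
  · rintro ⟨a, l1, l2, ha, hcs⟩
    cases l1 with
    | nil =>
      simp only [List.nil_append, List.cons.injEq] at hcs
      refine Or.inl ⟨hcs.1 ▸ ha, ?_⟩
      rw [hcs.2]; rfl
    | cons x l1' =>
      simp only [List.cons_append, List.cons.injEq] at hcs
      exact Or.inr ⟨a, l1', l2, ha, hcs.2⟩
  · rintro (⟨hc, hh⟩ | ⟨a, l1, l2, ha, hcs⟩)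
    · cases rest with
      | nil => simp at hh
      | cons y t =>
        simp only [List.head?_cons, Option.some.injEq] at hh
        exact ⟨c, [], t, hc, by simp [hh]⟩
    · exact ⟨a, c :: l1, l2, ha, by rw [hcs]; rfl⟩

lemma pvScan_snd (cs : List Char) (i : Int) (prev : Option Char) (eq : Int) (bad : Bool) :
    (pvScan cs i prev eq bad).2 = true ↔
      bad = true ∨
      ((prev = some '=' ∨ prev = some '!' ∨ prev = some '<' ∨ prev = some '>') ∧
        cs.head? = some '=') ∨
      pvAdj cs := by
  induction cs generalizing i prev eq bad with
  | nil => simp [pvScan, pvAdj]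
  | cons c rest ih =>
    show (pvScan rest _ _ _ _).2 = true ↔ _
    rw [ih, pvAdj_cons]
    simp only [List.head?_cons, Option.some.injEq]
    split_ifs with h
    · constructor
      · intro _
        exact Or.inr (Or.inl ⟨h.2, h.1⟩)
      · intro _
        exact Or.inl rfl
    · constructor
      · rintro (hb | ⟨hops, hh⟩ | hadj)
        · exact Or.inl hb
        · exact Or.inr (Or.inr (Or.inl ⟨hops, hh⟩))
        · exact Or.inr (Or.inr (Or.inr hadj))
      · rintro (hb | ⟨hops, hh⟩ | ⟨hops, hh⟩ | hadj)
        · exact Or.inl hb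
        · exact absurd ⟨hh, hops⟩ h
        · exact Or.inr (Or.inl ⟨hops, hh⟩)
        · exact Or.inr (Or.inr hadj)

lemma pvScan_fst (cs : List Char) (i : Int) (prev : Option Char) (eq : Int) (bad : Bool)
    (hi : 0 ≤ i) :
    (pvScan cs i prev eq bad).1 =
      if eq < 0 then
        (if '=' ∈ cs then i + ((cs.takeWhile (· ≠ '=')).length : Int) else eq)
      else eq := by
  induction cs generalizing i prev eq bad with
  | nil => simp [pvScan]
  | cons c rest ih =>
    show (pvScan rest (i + 1) (some c) (if c = '=' ∧ eq < 0 then i else eq) _).1 = _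
    by_cases hc : c = '='
    · subst hc
      by_cases he : eq < 0
      · rw [if_pos (show ('=' : Char) = '=' ∧ eq < 0 from ⟨rfl, he⟩)]
        rw [ih _ _ _ _ (by omega)]
        rw [if_neg (by omega : ¬ i < 0), if_pos he,
            if_pos (show ('=' : Char) ∈ '=' :: rest from List.mem_cons_self ..),
            List.takeWhile_cons]
        simp
      · rw [if_neg (fun hh => he hh.2)]
        rw [ih _ _ _ _ (by omega), if_neg he, if_neg he]
    · rw [if_neg (fun hh => hc hh.1)]
      rw [ih _ _ _ _ (by omega)]
      have hne : ('=' : Char) ≠ c := fun h => hc h.symm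
      by_cases he : eq < 0
      · rw [if_pos he, if_pos he]
        have htw : (c :: rest).takeWhile (· ≠ '=') = c :: rest.takeWhile (· ≠ '=') := by
          simp [List.takeWhile_cons, hc]
        have hmm : ('=' ∈ c :: rest) = ('=' ∈ rest) := by
          simp [List.mem_cons, hne]
        simp only [hmm, htw, List.length_cons]
        by_cases hr : '=' ∈ rest
        · simp only [if_pos hr]
          push_cast
          ring
        · simp only [if_neg hr]
      · rw [if_neg he, if_neg he]

-- splitOnMax with maxsplit 0 just emits the remainder
lemma pvGo_zero (fuel : Nat) (l cur : List Char) (acc : List (List Char)) :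
    PySem.Chars.splitOnMax.go ['='] fuel 0 l cur acc = ((cur.reverse ++ l) :: acc).reverse := by
  cases fuel with
  | zero => rfl
  | succ f =>
    cases l with
    | nil => simp [PySem.Chars.splitOnMax.go]
    | cons c rest => simp [PySem.Chars.splitOnMax.go]

lemma pvGo_one (l : List Char) (fuel : Nat) (cur : List Char) (acc : List (List Char))
    (h : l.length < fuel) :
    PySem.Chars.splitOnMax.go ['='] fuel 1 l cur acc =
      acc.reverse ++
        (if '=' ∈ l then
          [cur.reverse ++ l.takeWhile (· ≠ '='), (l.dropWhile (· ≠ '=')).tail]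
        else [cur.reverse ++ l]) := by
  induction l generalizing fuel cur acc with
  | nil =>
    cases fuel with
    | zero => omega
    | succ f => simp [PySem.Chars.splitOnMax.go]
  | cons c rest ih =>
    cases fuel with
    | zero => omega
    | succ f =>
      by_cases hc : c = '='
      · subst hc
        have hstep : PySem.Chars.splitOnMax.go ['='] (f + 1) 1 ('=' :: rest) cur acc =
            PySem.Chars.splitOnMax.go ['='] f 0 rest [] (cur.reverse :: acc) := by
          simp [PySem.Chars.splitOnMax.go, List.isPrefixOf]
        rw [hstep, pvGo_zero]
        simp [List.takeWhile_cons, List.dropWhile_cons]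
      · have hne : ('=' : Char) ≠ c := fun h => hc h.symm
        have hstep : PySem.Chars.splitOnMax.go ['='] (f + 1) 1 (c :: rest) cur acc =
            PySem.Chars.splitOnMax.go ['='] f 1 rest (c :: cur) acc := by
          simp [PySem.Chars.splitOnMax.go, List.isPrefixOf, hne]
        rw [hstep, ih f (c :: cur) acc (by simpa using Nat.lt_of_succ_lt_succ h)]
        by_cases hr : '=' ∈ rest
        · simp [hr, hc]
        · simp [hr, hc, hne]

lemma pvSplit (cs : List Char) :
    PySem.Chars.splitOnMax cs ['='] 1 =
      if '=' ∈ cs then [cs.takeWhile (· ≠ '='), (cs.dropWhile (· ≠ '=')).tail]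
      else [cs] := by
  unfold PySem.Chars.splitOnMax
  rw [if_neg (by norm_num)]
  show PySem.Chars.splitOnMax.go ['='] (cs.length + 1) 1 cs [] [] = _
  rw [pvGo_one cs (cs.length + 1) [] [] (by omega)]
  simp

lemma pvIsIn_two (a : Char) (cs : List Char) :
    PySem.Chars.isIn [a, '='] cs = true ↔ ∃ l1 l2, cs = l1 ++ a :: '=' :: l2 := by
  rw [PySem.Chars.isIn_iff_infix]
  constructor
  · rintro ⟨s, t, h⟩
    exact ⟨s, t, by simp [← h]⟩
  · rintro ⟨l1, l2, h⟩
    exact ⟨l1, l2, by simp [h]⟩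

lemma pvMem_iff_isIn_one (cs : List Char) :
    PySem.Chars.isIn ['='] cs = true ↔ '=' ∈ cs := by
  rw [PySem.Chars.isIn_iff_infix]
  constructor
  · rintro ⟨s, t, h⟩
    rw [← h]; simp
  · intro h
    obtain ⟨s, t, rfl⟩ := List.append_of_mem h
    exact ⟨s, t, by simp⟩

lemma pvAlpha (c : Char) : pv_is_alpha c = PySem.Chars.isalpha c := by
  unfold pv_is_alpha PySem.Chars.isalpha PySem.Chars.isupper PySem.Chars.islower
  exact Bool.or_comm _ _

lemma pvAlnum (c : Char) : pv_is_alnum c = PySem.Chars.isalnum c := by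
  unfold pv_is_alnum PySem.Chars.isalnum
  rw [pvAlpha]; rfl

lemma pvValidator (s : String) :
    is_valid_variable_name s = pvIsIdentAscii s.toList := by
  unfold is_valid_variable_name pvIsIdentAscii
  cases hL : s.toList with
  | nil => rfl
  | cons c rest =>
    simp only [pvAlpha, pvAlnum, List.all_cons, Bool.not_eq_true']
    by_cases ha : (PySem.Chars.isalpha c || c == '_') = true
    · rw [if_neg (by simp [ha]), ha, Bool.true_and]
      have hcn : (PySem.Chars.isalnum c || c == '_') = true := by
        rcases Bool.or_eq_true_iff.mp ha with h | h
        · exact Bool.or_eq_true_iff.mpr (Or.inl (by simp [PySem.Chars.isalnum, h]))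
        · exact Bool.or_eq_true_iff.mpr (Or.inr h)
      rw [hcn, Bool.true_and]
    · rw [if_pos (by simp [Bool.eq_false_iff.mpr ha]), Bool.eq_false_iff.mpr ha]
      simp

lemma pvTakeLen (cs : List Char) (p : Char → Bool) :
    cs.take (cs.takeWhile p).length = cs.takeWhile p := by
  induction cs with
  | nil => simp
  | cons c rest ih =>
    by_cases hp : p c = true
    · simp [List.takeWhile_cons, hp, ih]
    · simp [List.takeWhile_cons, hp]

lemma pvDropLen (cs : List Char) (p : Char → Bool) :
    cs.drop ((cs.takeWhile p).length + 1) = (cs.dropWhile p).tail := by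
  induction cs with
  | nil => simp
  | cons c rest ih =>
    by_cases hp : p c = true
    · simp [List.takeWhile_cons, List.dropWhile_cons, hp, ih]
    · simp [List.takeWhile_cons, List.dropWhile_cons, hp]

-- ===== VERDICT (by name: the statement is the Claim_ definition above) =====
theorem parse_assignment_spec : Claim_equal_parse_assignment := by
  intro expr _
  show parse_assignment expr = parse_assignment_alt expr
  have hsnd := pvScan_snd expr.toList 0 none (-1) false
  simp only [Bool.false_eq_true, false_or, reduceCtorEq, false_and, or_false] at hsnd
  have hfst := pvScan_fst expr.toList 0 none (-1) false le_rfl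
  by_cases hb : (pvScan expr.toList 0 none (-1) false).2 = true
  · -- a comparison operator occurs: both sides return (none, expr)
    have hBalt : parse_assignment_alt expr = (none, expr) := by
      simp [parse_assignment_alt, hb]
    rw [hBalt]
    obtain ⟨a, l1, l2, ha, hEq⟩ := hsnd.mp hb
    have hOr : PySem.Chars.isIn ['=', '='] expr.toList = true ∨
        PySem.Chars.isIn ['!', '='] expr.toList = true ∨
        PySem.Chars.isIn ['<', '='] expr.toList = true ∨
        PySem.Chars.isIn ['>', '='] expr.toList = true := by
      rcases ha with rfl | rfl | rfl | rfl
      · exact Or.inl ((pvIsIn_two '=' expr.toList).mpr ⟨l1, l2, hEq⟩)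
      · exact Or.inr (Or.inl ((pvIsIn_two '!' expr.toList).mpr ⟨l1, l2, hEq⟩))
      · exact Or.inr (Or.inr (Or.inl ((pvIsIn_two '<' expr.toList).mpr ⟨l1, l2, hEq⟩)))
      · exact Or.inr (Or.inr (Or.inr ((pvIsIn_two '>' expr.toList).mpr ⟨l1, l2, hEq⟩)))
    unfold parse_assignment
    split_ifs with h1 h2 h3 h4 h5 <;>
      first
      | rfl
      | (rcases hOr with h | h | h | h
         exacts [absurd h h1, absurd h h2, absurd h h3, absurd h h4])
  · -- no comparison operator
    have hnAdj : ¬ pvAdj expr.toList := fun h => hb (hsnd.mpr h)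
    have hbf : (pvScan expr.toList 0 none (-1) false).2 = false := Bool.eq_false_iff.mpr hb
    have h1 : PySem.Str.isIn "==" expr = false := by
      refine Bool.eq_false_iff.mpr (fun htr => hnAdj ?_)
      obtain ⟨l1, l2, hEq⟩ := (pvIsIn_two '=' expr.toList).mp htr
      exact ⟨'=', l1, l2, Or.inl rfl, hEq⟩
    have h2 : PySem.Str.isIn "!=" expr = false := by
      refine Bool.eq_false_iff.mpr (fun htr => hnAdj ?_)
      obtain ⟨l1, l2, hEq⟩ := (pvIsIn_two '!' expr.toList).mp htr
      exact ⟨'!', l1, l2, Or.inr (Or.inl rfl), hEq⟩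
    have h3 : PySem.Str.isIn "<=" expr = false := by
      refine Bool.eq_false_iff.mpr (fun htr => hnAdj ?_)
      obtain ⟨l1, l2, hEq⟩ := (pvIsIn_two '<' expr.toList).mp htr
      exact ⟨'<', l1, l2, Or.inr (Or.inr (Or.inl rfl)), hEq⟩
    have h4 : PySem.Str.isIn ">=" expr = false := by
      refine Bool.eq_false_iff.mpr (fun htr => hnAdj ?_)
      obtain ⟨l1, l2, hEq⟩ := (pvIsIn_two '>' expr.toList).mp htr
      exact ⟨'>', l1, l2, Or.inr (Or.inr (Or.inr rfl)), hEq⟩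
    by_cases hm : '=' ∈ expr.toList
    · have hm' : PySem.Str.isIn "=" expr = true := (pvMem_iff_isIn_one expr.toList).mpr hm
      have hfst' : (pvScan expr.toList 0 none (-1) false).1 =
          ((expr.toList.takeWhile (· ≠ '=')).length : Int) := by
        rw [hfst, if_pos (by norm_num : (-1 : Int) < 0), if_pos hm, zero_add]
      have hparts : PySem.Str.splitMax? expr "=" 1 =
          some [String.ofList (expr.toList.takeWhile (· ≠ '=')),
                String.ofList ((expr.toList.dropWhile (· ≠ '=')).tail)] := by
        show Option.map (fun x => List.map String.ofList x)
            (PySem.Chars.splitMax? expr.toList ['='] 1) = _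
        unfold PySem.Chars.splitMax?
        rw [if_neg (by norm_num), pvSplit, if_pos hm]
        rfl
      have hA : parse_assignment expr =
          (if pvIsIdentAscii (PySem.Chars.strip (expr.toList.takeWhile (· ≠ '='))) = true then
            (some (String.ofList (PySem.Chars.strip (expr.toList.takeWhile (· ≠ '=')))),
             String.ofList (PySem.Chars.strip ((expr.toList.dropWhile (· ≠ '=')).tail)))
          else (none, expr)) := by
        unfold parse_assignment
        rw [h1, h2, h3, h4, hm']
        simp only [Bool.false_eq_true, if_false, if_true, hparts, Option.getD_some]
        norm_num [PySem.List.pyGetD, PySem.List.pyGet?, PySem.List.pyIdx?, PySem.Str.strip,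
          String.toList_ofList, pvValidator]
      have hge : ¬ (((expr.toList.takeWhile (· ≠ '=')).length : Int) < 0) := by omega
      have htn : ((expr.toList.takeWhile (· ≠ '=')).length : Int).toNat =
          (expr.toList.takeWhile (· ≠ '=')).length := by omega
      have hB : parse_assignment_alt expr =
          (if pvIsIdentAscii (PySem.Chars.strip (expr.toList.takeWhile (· ≠ '='))) = true then
            (some (String.ofList (PySem.Chars.strip (expr.toList.takeWhile (· ≠ '=')))),
             String.ofList (PySem.Chars.strip ((expr.toList.dropWhile (· ≠ '=')).tail)))
          else (none, expr)) := by
        show (if ((pvScan expr.toList 0 none (-1) false).2 ||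
                decide ((pvScan expr.toList 0 none (-1) false).1 < 0)) = true then
              ((none : Option String), expr)
            else
              if pvIsIdentAscii (PySem.Chars.strip
                  (expr.toList.take (pvScan expr.toList 0 none (-1) false).1.toNat)) = true then
                (some (String.ofList (PySem.Chars.strip
                    (expr.toList.take (pvScan expr.toList 0 none (-1) false).1.toNat))),
                 String.ofList (PySem.Chars.strip
                    (expr.toList.drop ((pvScan expr.toList 0 none (-1) false).1.toNat + 1))))
              else (none, expr)) = _
        rw [hbf, hfst']
        rw [if_neg (by simpa using hge)]
        rw [htn, pvTakeLen, pvDropLen]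
      rw [hA, hB]
    · have hm' : PySem.Str.isIn "=" expr = false := by
        refine Bool.eq_false_iff.mpr (fun htr => hm ?_)
        exact (pvMem_iff_isIn_one expr.toList).mp htr
      have hfst' : (pvScan expr.toList 0 none (-1) false).1 = -1 := by
        rw [hfst, if_pos (by norm_num : (-1 : Int) < 0), if_neg hm]
      have hA : parse_assignment expr = (none, expr) := by
        unfold parse_assignment
        rw [h1, h2, h3, h4, hm']
        simp
      have hB : parse_assignment_alt expr = (none, expr) := by
        show (if ((pvScan expr.toList 0 none (-1) false).2 ||
                decide ((pvScan expr.toList 0 none (-1) false).1 < 0)) = true then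
              ((none : Option String), expr)
            else
              if pvIsIdentAscii (PySem.Chars.strip
                  (expr.toList.take (pvScan expr.toList 0 none (-1) false).1.toNat)) = true then
                (some (String.ofList (PySem.Chars.strip
                    (expr.toList.take (pvScan expr.toList 0 none (-1) false).1.toNat))),
                 String.ofList (PySem.Chars.strip
                    (expr.toList.drop ((pvScan expr.toList 0 none (-1) false).1.toNat + 1))))
              else (none, expr)) = _
        rw [hbf, hfst']
        norm_num
      rw [hA, hB]
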